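-- pv_equiv track=rewrite | github.com/Lazar-Ilic/Lazar | Notes/Computer Science/Algorithms/Meta/Sebastien Rubens Meta Puzzles Solutions/py3/l4_mathematical_art.py | read_strokes
-- ===== SOURCE A (Python) =====
-- def read_strokes(N, L, D):
--     # O(N)
--     hor_strokes, ver_strokes = [], []
--     x0, y0 = 0, 0
--     for length, direction in zip(L[:N], D[:N]):
--         if direction == 'R':
--             x1, y1 = x0 + length, y0
--             hor_strokes.append((y0, x0, -1))
--             hor_strokes.append((y0, x1, +1))
--         elif direction == 'L':
--             x1, y1 = x0 - length, y0
--             hor_strokes.append((y0, x1, -1))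
--             hor_strokes.append((y0, x0, +1))
--         elif direction == 'U':
--             x1, y1 = x0, y0 + length
--             ver_strokes.append((x0, y0, -1))
--             ver_strokes.append((x0, y1, +1))
--         elif direction == 'D':
--             x1, y1 = x0, y0 - length
--             ver_strokes.append((x0, y1, -1))
--             ver_strokes.append((x0, y0, +1))
--         else:
--             raise NotImplementedError("direction '%s' is not processed" % direction)
--         x0, y0 = x1, y1
--     return hor_strokes, ver_strokes
-- ===== SOURCE B (Python) =====
-- _DELTA = {'R': (1, 0), 'L': (-1, 0), 'U': (0, 1), 'D': (0, -1)}
--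
-- def read_strokes(N, L, D):
--     # Pass 1: build the full polyline of path vertices (validating directions as we go).
--     moves = list(zip(L[:N], D[:N]))
--     pts = [(0, 0)]
--     for length, d in moves:
--         if d not in _DELTA:
--             raise NotImplementedError("direction '%s' is not processed" % d)
--         dx, dy = _DELTA[d]
--         x, y = pts[-1]
--         pts.append((x + dx * length, y + dy * length))
--     # Pass 2: turn each consecutive vertex pair into its two stroke events.
--     hor_strokes, ver_strokes = [], []
--     for ((x0, y0), (x1, y1)), (_, d) in zip(zip(pts, pts[1:]), moves):
--         forward = d in ('R', 'U')
--         if d in ('R', 'L'):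
--             a, b = (x0, x1) if forward else (x1, x0)
--             hor_strokes += [(y0, a, -1), (y0, b, +1)]
--         else:
--             a, b = (y0, y1) if forward else (y1, y0)
--             ver_strokes += [(x0, a, -1), (x0, b, +1)]
--     return hor_strokes, ver_strokes
-- ===== Notes on version B (the rewrite author's own statement) =====
-- stated objective: alternative
-- what changed: B is staged: a first pass materialises the whole polyline of path vertices (next vertex = previous + unit-vector * length, validating directions as it goes), and a second pass over consecutive vertex pairs emits the stroke-event tuples; A interleaves geometry and emission in one stateful four-branch loop.
import Mathlib
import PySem

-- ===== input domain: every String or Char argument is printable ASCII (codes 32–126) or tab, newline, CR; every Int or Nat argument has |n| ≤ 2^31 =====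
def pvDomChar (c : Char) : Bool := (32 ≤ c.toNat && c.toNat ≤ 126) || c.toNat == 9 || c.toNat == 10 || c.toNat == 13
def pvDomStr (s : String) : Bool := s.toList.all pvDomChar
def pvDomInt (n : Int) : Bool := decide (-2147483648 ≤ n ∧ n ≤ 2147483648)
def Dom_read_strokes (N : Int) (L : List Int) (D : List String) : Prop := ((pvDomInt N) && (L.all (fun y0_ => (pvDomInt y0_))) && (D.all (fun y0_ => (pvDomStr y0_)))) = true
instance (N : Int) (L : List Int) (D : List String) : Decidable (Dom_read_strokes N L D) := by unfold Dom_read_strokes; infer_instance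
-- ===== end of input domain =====

-- B is a two-stage re-decomposition (vertex polyline first, stroke events second); return value only, no speed claim.

-- ===== PORT A =====
-- state: (hor_strokes, ver_strokes, x0, y0)
def read_strokes_step (st : List (Int × Int × Int) × List (Int × Int × Int) × Int × Int)
    (p : Int × String) : List (Int × Int × Int) × List (Int × Int × Int) × Int × Int :=
  let (hor, ver, x0, y0) := st
  let (length, direction) := p
  if direction == "R" then
    (hor ++ [(y0, x0, -1), (y0, x0 + length, 1)], ver, x0 + length, y0)
  else if direction == "L" then
    (hor ++ [(y0, x0 - length, -1), (y0, x0, 1)], ver, x0 - length, y0)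
  else if direction == "U" then
    (hor, ver ++ [(x0, y0, -1), (x0, y0 + length, 1)], x0, y0 + length)
  else if direction == "D" then
    (hor, ver ++ [(x0, y0 - length, -1), (x0, y0, 1)], x0, y0 - length)
  else st  -- Python raises NotImplementedError here; such inputs are outside Pre_read_strokes

def read_strokes (N : Int) (L : List Int) (D : List String) : (List (Int × Int × Int)) × (List (Int × Int × Int)) :=
  let r := ((PySem.List.slice L none (some N)).zip (PySem.List.slice D none (some N))).foldl
    read_strokes_step ([], [], 0, 0)
  (r.1, r.2.1)

-- ===== PORT B =====
def pvDelta : PySem.Dict String (Int × Int) :=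
  PySem.Dict.ofList [("R", (1, 0)), ("L", (-1, 0)), ("U", (0, 1)), ("D", (0, -1))]

-- Pass 1 body: append the next path vertex (pts[-1] + delta * length)
def pvVertexStep (pts : List (Int × Int)) (p : Int × String) : List (Int × Int) :=
  match PySem.Dict.get? pvDelta p.2 with
  | none => pts  -- Python raises NotImplementedError here; outside Pre_read_strokes
  | some (dx, dy) =>
    match PySem.List.pyGet? pts (-1) with
    | none => pts  -- unreachable: pts starts nonempty and only grows
    | some (x, y) => pts ++ [(x + dx * p.1, y + dy * p.1)]

-- Pass 2 body: one consecutive vertex pair with its direction → two stroke events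
def pvEmitStep (st : List (Int × Int × Int) × List (Int × Int × Int))
    (q : ((Int × Int) × (Int × Int)) × (Int × String)) :
    List (Int × Int × Int) × List (Int × Int × Int) :=
  let (hor, ver) := st
  let ((p0, p1), m) := q
  let d := m.2
  let forward := d == "R" || d == "U"
  if d == "R" || d == "L" then
    let ab := if forward then (p0.1, p1.1) else (p1.1, p0.1)
    (hor ++ [(p0.2, ab.1, -1), (p0.2, ab.2, 1)], ver)
  else
    let ab := if forward then (p0.2, p1.2) else (p1.2, p0.2)
    (hor ++ [], ver ++ [(p0.1, ab.1, -1), (p0.1, ab.2, 1)])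

def read_strokes_alt (N : Int) (L : List Int) (D : List String) : (List (Int × Int × Int)) × (List (Int × Int × Int)) :=
  let moves := (PySem.List.slice L none (some N)).zip (PySem.List.slice D none (some N))
  let pts := moves.foldl pvVertexStep [(0, 0)]
  ((pts.zip (PySem.List.slice pts (some 1) none)).zip moves).foldl pvEmitStep ([], [])

-- ===== PRECONDITION & SPEC =====
-- Pre_ excludes exactly the inputs where some iterated direction is not R/L/U/D, on which both Pythons raise NotImplementedError.
def Pre_read_strokes (N : Int) (L : List Int) (D : List String) : Prop :=
  ∀ p ∈ (PySem.List.slice L none (some N)).zip (PySem.List.slice D none (some N)),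
    p.2 ∈ (["R", "L", "U", "D"] : List String)
instance (N : Int) (L : List Int) (D : List String) : Decidable (Pre_read_strokes N L D) := by
  unfold Pre_read_strokes; infer_instance

def pvWitness_read_strokes : Int × List Int × List String := (3, [2, 3, 4], ["R", "U", "L"])

def Spec_read_strokes (N : Int) (L : List Int) (D : List String) (out : (List (Int × Int × Int)) × (List (Int × Int × Int))) : Prop := out = read_strokes_alt N L D
instance (N : Int) (L : List Int) (D : List String) (out : (List (Int × Int × Int)) × (List (Int × Int × Int))) : Decidable (Spec_read_strokes N L D out) := by unfold Spec_read_strokes; infer_instance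

-- ===== CLAIM (what is proved, stated in full; the proofs are below) =====
def Claim_equal_read_strokes : Prop := ∀ (N : Int) (L : List Int) (D : List String), Dom_read_strokes N L D → Pre_read_strokes N L D → Spec_read_strokes N L D (read_strokes N L D)

-- ===== LEMMAS AND PROOFS =====

-- next vertex, as a function (proof-side abbreviation of what both programs compute)
def pvNext (p : Int × Int) (m : Int × String) : Int × Int :=
  let (x, y) := p
  if m.2 == "R" then (x + m.1, y)
  else if m.2 == "L" then (x - m.1, y)
  else if m.2 == "U" then (x, y + m.1)
  else (x, y - m.1)

-- the abstract vertex chain of a move list from a start point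
def pvChain (p : Int × Int) : List (Int × String) → List (Int × Int)
  | [] => [p]
  | m :: ms => p :: pvChain (pvNext p m) ms

theorem vertices_eq_chain (ms : List (Int × String))
    (h : ∀ m ∈ ms, m.2 ∈ (["R", "L", "U", "D"] : List String)) :
    ∀ (acc : List (Int × Int)) (p : Int × Int),
      ms.foldl pvVertexStep (acc ++ [p]) = acc ++ pvChain p ms := by
  induction ms with
  | nil => intro acc p; simp [pvChain]
  | cons m ms ih =>
    intro acc p
    have hm := h m (by simp)
    have hrest : ∀ m' ∈ ms, m'.2 ∈ (["R", "L", "U", "D"] : List String) :=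
      fun m' hm' => h m' (by simp [hm'])
    have hstep : pvVertexStep (acc ++ [p]) m = (acc ++ [p]) ++ [pvNext p m] := by
      obtain ⟨len, d⟩ := m
      obtain ⟨x, y⟩ := p
      have hRd : PySem.Dict.get? pvDelta "R" = some (1, 0) := by decide
      have hLd : PySem.Dict.get? pvDelta "L" = some (-1, 0) := by decide
      have hUd : PySem.Dict.get? pvDelta "U" = some (0, 1) := by decide
      have hDd : PySem.Dict.get? pvDelta "D" = some (0, -1) := by decide
      simp only [List.mem_cons, List.not_mem_nil, or_false] at hm
      rcases hm with h' | h' | h' | h' <;> subst h' <;>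
        simp [pvVertexStep, pvNext, hRd, hLd, hUd, hDd,
          PySem.List.pyGet?_neg_one_append_singleton] <;> ring_nf
    rw [List.foldl_cons, hstep, ih hrest (acc ++ [p]) (pvNext p m)]
    simp [pvChain]

-- the main invariant: A's interleaved fold equals B's emit fold over the chain
theorem fold_eq (ms : List (Int × String))
    (h : ∀ m ∈ ms, m.2 ∈ (["R", "L", "U", "D"] : List String)) :
    ∀ (hor ver : List (Int × Int × Int)) (p : Int × Int),
      (ms.foldl read_strokes_step (hor, ver, p.1, p.2)).1 =
        ((((pvChain p ms).zip (pvChain p ms).tail).zip ms).foldl pvEmitStep (hor, ver)).1 ∧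
      (ms.foldl read_strokes_step (hor, ver, p.1, p.2)).2.1 =
        ((((pvChain p ms).zip (pvChain p ms).tail).zip ms).foldl pvEmitStep (hor, ver)).2 := by
  induction ms with
  | nil => intro hor ver p; simp [pvChain]
  | cons m ms ih =>
    intro hor ver p
    have hm := h m (by simp)
    have hrest : ∀ m' ∈ ms, m'.2 ∈ (["R", "L", "U", "D"] : List String) :=
      fun m' hm' => h m' (by simp [hm'])
    obtain ⟨x, y⟩ := p
    -- chain unfolds: p :: pvChain (pvNext p m) ms, whose head is pvNext p m
    have hchain : pvChain (x, y) (m :: ms) = (x, y) :: pvChain (pvNext (x, y) m) ms := rfl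
    have hhead : ∃ rest, pvChain (pvNext (x, y) m) ms = pvNext (x, y) m :: rest := by
      cases ms <;> exact ⟨_, rfl⟩
    obtain ⟨rest, hr⟩ := hhead
    have hstepA : read_strokes_step (hor, ver, x, y) m =
        ((pvEmitStep (hor, ver) (((x, y), pvNext (x, y) m), m)).1,
         (pvEmitStep (hor, ver) (((x, y), pvNext (x, y) m), m)).2,
         (pvNext (x, y) m).1, (pvNext (x, y) m).2) := by
      obtain ⟨len, d⟩ := m
      simp only [List.mem_cons, List.not_mem_nil, or_false] at hm
      rcases hm with h' | h' | h' | h' <;> subst h' <;>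
        simp [read_strokes_step, pvEmitStep, pvNext]
    rw [hchain, hr]
    simp only [List.foldl_cons, List.tail_cons, List.zip_cons_cons, hstepA]
    have htail : rest = (pvChain (pvNext (x, y) m) ms).tail := by simp [hr]
    have hcons : pvNext (x, y) m :: (pvChain (pvNext (x, y) m) ms).tail
        = pvChain (pvNext (x, y) m) ms := by simp [hr]
    rw [htail, hcons]
    exact ih hrest (pvEmitStep (hor, ver) (((x, y), pvNext (x, y) m), m)).1
      (pvEmitStep (hor, ver) (((x, y), pvNext (x, y) m), m)).2 (pvNext (x, y) m)

theorem read_strokes_spec : Claim_equal_read_strokes := by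
  intro N L D _ hPre
  unfold Spec_read_strokes read_strokes read_strokes_alt
  set ms := (PySem.List.slice L none (some N)).zip (PySem.List.slice D none (some N)) with hms
  have h : ∀ m ∈ ms, m.2 ∈ (["R", "L", "U", "D"] : List String) := hPre
  have hv : ms.foldl pvVertexStep [(0, 0)] = pvChain (0, 0) ms := by
    have := vertices_eq_chain ms h [] (0, 0)
    simpa using this
  have := fold_eq ms h [] [] (0, 0)
  simp only [hv, PySem.List.slice_from_one]
  exact Prod.ext this.1 this.2
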